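-- pv_equiv track=rewrite | github.com/MrBrantCode/unitest_baseline | mut_generate/mist_train_taco/taco_13970/solution.py | count_palindromic_primes
-- ===== SOURCE A (Python) =====
-- import math
--
-- def is_prime(n):
--     if n <= 1:
--         return False
--     max_div = math.floor(math.sqrt(n))
--     for i in range(2, max_div + 1):
--         if n % i == 0:
--             return False
--     return True
--
-- def count_palindromic_primes(n):
--     count = 0
--     for i in range(n + 1):
--         x = str(i)
--         if x == x[::-1]:
--             if is_prime(i):
--                 count += 1
--     return count
-- ===== SOURCE B (Python) =====
-- import math
--
-- def count_palindromic_primes(n):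
--     if n < 2:
--         return 0
--     sieve = [True] * (n + 1)
--     sieve[0] = sieve[1] = False
--     for p in range(2, math.isqrt(n) + 1):
--         if sieve[p]:
--             for m in range(p * p, n + 1, p):
--                 sieve[m] = False
--     count = 0
--     for i in range(2, n + 1):
--         s = str(i)
--         if sieve[i] and s == s[::-1]:
--             count += 1
--     return count
-- ===== Notes on version B (the rewrite author's own statement) =====
-- stated objective: alternative
-- what changed: Replaced per-number trial-division primality testing with a Sieve of Eratosthenes built once, then a single pass counting palindromic survivors.
import Mathlib
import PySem

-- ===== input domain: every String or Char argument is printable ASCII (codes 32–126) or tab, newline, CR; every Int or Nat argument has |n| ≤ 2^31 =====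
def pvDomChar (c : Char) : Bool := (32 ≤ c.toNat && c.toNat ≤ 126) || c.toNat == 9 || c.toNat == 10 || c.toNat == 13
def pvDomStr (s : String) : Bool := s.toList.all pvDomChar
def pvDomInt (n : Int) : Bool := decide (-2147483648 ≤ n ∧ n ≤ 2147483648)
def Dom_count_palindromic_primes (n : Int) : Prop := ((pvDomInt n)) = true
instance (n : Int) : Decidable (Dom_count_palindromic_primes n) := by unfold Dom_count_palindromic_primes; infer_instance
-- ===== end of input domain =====

-- B replaces A's per-number trial-division primality test with a Sieve of Eratosthenes
-- built once, then one counting pass over the palindromic survivors (alternative algorithm).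

-- ===== PORT A =====
-- is_prime: 'math.floor(math.sqrt(n))' is ported as Nat.sqrt n.toNat — exact on the
-- domain 2 ≤ n ≤ 2^31 (the only arguments the guard lets through within Dom_), where the
-- correctly-rounded double sqrt floors to the integer square root.
-- The early-return loop 'for i in range(2, max_div+1): if n % i == 0: return False' is the
-- .all over the same range.
def is_prime (n : Int) : Bool :=
  if n ≤ 1 then false
  else
    let maxDiv : Int := (Nat.sqrt n.toNat : Int)
    (PySem.List.pyRange 2 (maxDiv + 1) 1).all (fun i => !(PySem.Int.mod n i == 0))

-- 'x = str(i); x == x[::-1]' is ported on List Char: toChars and reverse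
-- (PySem.Str.slice?_none_none_neg_one: s[::-1] is the reverse).
def count_palindromic_primes (n : Int) : Int :=
  (PySem.List.pyRange 0 (n + 1) 1).foldl
    (fun count i =>
      let x := PySem.Int.toChars i
      if x = x.reverse then (if is_prime i then count + 1 else count) else count)
    0

-- ===== PORT B =====
-- inner loop 'for m in range(p*p, n+1, p): sieve[m] = False' (all indices in bounds)
def pvMark (s : List Bool) (ms : List Nat) : List Bool :=
  ms.foldl (fun s m => s.set m false) s

-- one iteration of the outer loop body; range(p*p, N+1, p) over Nats is
-- List.range' (p*p) ((N+1 - p*p + p - 1)/p) p (that quotient is Python's len(range(p*p, N+1, p)))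
def pvSieveStep (N : Nat) (s : List Bool) (p : Nat) : List Bool :=
  if s.getD p false then pvMark s (List.range' (p * p) ((N + 1 - p * p + p - 1) / p) p) else s

-- sieve = [True]*(n+1); sieve[0] = sieve[1] = False; for p in range(2, isqrt(n)+1): …
-- (after the n < 2 guard all loop bounds are nonnegative, so Python ranges are Nat ranges)
def pvSieve (N : Nat) : List Bool :=
  (List.range' 2 (Nat.sqrt N + 1 - 2) 1).foldl (pvSieveStep N)
    (((List.replicate (N + 1) true).set 0 false).set 1 false)

def count_palindromic_primes_alt (n : Int) : Int :=
  if n < 2 then 0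
  else
    let N := n.toNat
    let sieve := pvSieve N
    (List.range' 2 (N + 1 - 2) 1).foldl
      (fun count (i : Nat) =>
        let x := PySem.Int.toChars (i : Int)
        if sieve.getD i false && decide (x = x.reverse) then count + 1 else count)
      0

-- ===== PRECONDITION & SPEC =====
def Spec_count_palindromic_primes (n : Int) (out : Int) : Prop := out = count_palindromic_primes_alt n
instance (n : Int) (out : Int) : Decidable (Spec_count_palindromic_primes n out) := by unfold Spec_count_palindromic_primes; infer_instance

-- ===== CLAIM (what is proved, stated in full; the proofs are below) =====
def Claim_equal_count_palindromic_primes : Prop := ∀ (n : Int), Dom_count_palindromic_primes n → Spec_count_palindromic_primes n (count_palindromic_primes n)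

-- ===== LEMMAS AND PROOFS =====

lemma pvMark_length (ms : List Nat) (s : List Bool) : (pvMark s ms).length = s.length := by
  induction ms generalizing s with
  | nil => rfl
  | cons m ms ih =>
      show (pvMark (s.set m false) ms).length = _
      rw [ih, List.length_set]

lemma pvMark_getD (ms : List Nat) (s : List Bool) (i : Nat) :
    (pvMark s ms).getD i false = (if i ∈ ms then false else s.getD i false) := by
  induction ms generalizing s with
  | nil => simp [pvMark]
  | cons m ms ih =>
      show (pvMark (s.set m false) ms).getD i false = _
      rw [ih]
      by_cases hmi : i = m
      · subst hmi
        have hset : (s.set i false)[i]?.getD false = false := by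
          rw [List.getElem?_set, if_pos rfl]
          split <;> rfl
        by_cases h : i ∈ ms
        · simp [h]
        · simp [h, List.getD, hset]
      · simp [List.getD, List.getElem?_set, Ne.symm hmi, hmi]

-- the set "already crossed out after the outer loop has processed p = 2 .. P"
def pvMarked (P i : Nat) : Prop := i = 0 ∨ i = 1 ∨ ∃ q, Nat.Prime q ∧ q ≤ P ∧ q ∣ i ∧ q * q ≤ i

lemma mem_inner_range {N p i : Nat} (hp : 2 ≤ p) (hpN : p * p ≤ N) :
    i ∈ List.range' (p * p) ((N + 1 - p * p + p - 1) / p) p ↔ p ∣ i ∧ p * p ≤ i ∧ i ≤ N := by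
  have hlen : (N + 1 - p * p + p - 1) / p = (N - p * p) / p + 1 := by
    have h : N + 1 - p * p + p - 1 = (N - p * p) + p := by omega
    rw [h, Nat.add_div_right _ (by omega)]
  rw [hlen, List.mem_range']
  constructor
  · rintro ⟨j, hj, rfl⟩
    have hjle : j ≤ (N - p * p) / p := by omega
    have h1 : j * p ≤ (N - p * p) / p * p := Nat.mul_le_mul_right p hjle
    have h2 : (N - p * p) / p * p ≤ N - p * p := Nat.div_mul_le_self _ _
    have hcomm : p * j = j * p := Nat.mul_comm p j
    exact ⟨⟨p + j, by ring⟩, Nat.le_add_right _ _, by omega⟩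
  · rintro ⟨⟨m, rfl⟩, hpi, hiN⟩
    have hmp : p ≤ m := Nat.le_of_mul_le_mul_left hpi (by omega)
    obtain ⟨t, rfl⟩ : ∃ t, m = p + t := ⟨m - p, by omega⟩
    have hsum : p * (p + t) = p * p + p * t := by ring
    have hcomm : p * t = t * p := Nat.mul_comm p t
    refine ⟨t, ?_, by omega⟩
    have hle : t * p ≤ N - p * p := by omega
    have := (Nat.le_div_iff_mul_le (k := p) (by omega)).mpr hle
    omega

lemma pvMarked_one_iff {i : Nat} : pvMarked 1 i ↔ i = 0 ∨ i = 1 := by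
  unfold pvMarked
  constructor
  · rintro (h | h | ⟨q, hq, hq1, -, -⟩)
    · exact Or.inl h
    · exact Or.inr h
    · exact absurd hq1 (by have := hq.two_le; omega)
  · rintro (h | h) <;> simp [h]

lemma pvInit_getD {N i : Nat} (hiN : i ≤ N) :
    ((((List.replicate (N + 1) true).set 0 false).set 1 false).getD i false = false) ↔ pvMarked 1 i := by
  rw [pvMarked_one_iff]
  rcases Nat.lt_or_ge i 2 with h | h
  · interval_cases i
    · simp [List.getD, List.getElem?_set]
    · have h0N : 0 < N := by omega
      simp [List.getD, List.getElem?_set, h0N]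
  · have h0 : i ≠ 0 := by omega
    have h1 : i ≠ 1 := by omega
    have hlt : i < N + 1 := by omega
    simp [List.getD, List.getElem?_set, Ne.symm h0, Ne.symm h1, List.getElem?_replicate, hlt]
    omega

lemma pvSieve_inv (N k : Nat) (hk : k ≤ Nat.sqrt N + 1 - 2) :
    ((List.range' 2 k 1).foldl (pvSieveStep N)
        (((List.replicate (N + 1) true).set 0 false).set 1 false)).length = N + 1 ∧
    ∀ i, i ≤ N →
      (((List.range' 2 k 1).foldl (pvSieveStep N)
          (((List.replicate (N + 1) true).set 0 false).set 1 false)).getD i false = false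
        ↔ pvMarked (k + 1) i) := by
  induction k with
  | zero =>
      constructor
      · simp [List.length_set]
      · intro i hiN
        simpa using pvInit_getD hiN
  | succ k ih =>
      obtain ⟨ihlen, ihget⟩ := ih (by omega)
      rw [List.range'_concat, List.foldl_append, List.foldl_cons, List.foldl_nil]
      set S := (List.range' 2 k 1).foldl (pvSieveStep N)
        (((List.replicate (N + 1) true).set 0 false).set 1 false) with hS
      have hp2 : 2 + 1 * k = k + 2 := by omega
      rw [hp2]
      have hpsq : k + 2 ≤ Nat.sqrt N := by omega
      have hppN : (k + 2) * (k + 2) ≤ N := Nat.le_sqrt.mp hpsq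
      have hpN : k + 2 ≤ N := le_trans hpsq (Nat.sqrt_le_self N)
      unfold pvSieveStep
      by_cases hp : S.getD (k + 2) false = true
      · rw [if_pos hp]
        have hnm : ¬ pvMarked (k + 1) (k + 2) := by
          intro h
          have hf := (ihget _ hpN).mpr h
          rw [hf] at hp
          exact Bool.noConfusion hp
        have hprime : Nat.Prime (k + 2) := by
          by_contra hnp
          have h1 : (k + 2).minFac ∣ (k + 2) := Nat.minFac_dvd _
          have h2 : Nat.Prime (k + 2).minFac := Nat.minFac_prime (by omega)
          have h3 : (k + 2).minFac ^ 2 ≤ k + 2 := Nat.minFac_sq_le_self (by omega) hnp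
          rw [pow_two] at h3
          have h5 : (k + 2).minFac ≤ k + 2 := Nat.le_of_dvd (by omega) h1
          have h4 : (k + 2).minFac ≠ k + 2 := by
            intro he; rw [he] at h3; nlinarith
          have h6 : 2 ≤ (k + 2).minFac := h2.two_le
          exact hnm (Or.inr (Or.inr ⟨(k + 2).minFac, h2, by omega, h1, h3⟩))
        refine ⟨by rw [pvMark_length]; exact ihlen, fun i hiN => ?_⟩
        rw [pvMark_getD]
        by_cases hci : i ∈ List.range' ((k + 2) * (k + 2)) ((N + 1 - (k + 2) * (k + 2) + (k + 2) - 1) / (k + 2)) (k + 2)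
        · rw [if_pos hci]
          obtain ⟨hdvd, hsq, -⟩ := (mem_inner_range (by omega) hppN).mp hci
          exact ⟨fun _ => Or.inr (Or.inr ⟨k + 2, hprime, le_refl _, hdvd, hsq⟩), fun _ => rfl⟩
        · rw [if_neg hci, ihget i hiN]
          unfold pvMarked
          constructor
          · rintro (h | h | ⟨q, hq, hqle, hqd, hqs⟩)
            · exact Or.inl h
            · exact Or.inr (Or.inl h)
            · exact Or.inr (Or.inr ⟨q, hq, by omega, hqd, hqs⟩)
          · rintro (h | h | ⟨q, hq, hqle, hqd, hqs⟩)
            · exact Or.inl h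
            · exact Or.inr (Or.inl h)
            · rcases Nat.lt_or_ge q (k + 2) with hql | hqe
              · exact Or.inr (Or.inr ⟨q, hq, by omega, hqd, hqs⟩)
              · have hq' : q = k + 2 := by omega
                subst hq'
                exact absurd ((mem_inner_range (by omega) hppN).mpr ⟨hqd, hqs, hiN⟩) hci
      · rw [if_neg hp]
        have hfalse : S.getD (k + 2) false = false := by
          revert hp; cases S.getD (k + 2) false <;> simp
        have hMp : pvMarked (k + 1) (k + 2) := (ihget _ hpN).mp hfalse
        have hnprime : ¬ Nat.Prime (k + 2) := by
          intro hpr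
          rcases hMp with h | h | ⟨r, hr, hrle, hrdvd, -⟩
          · omega
          · omega
          · have : r = k + 2 := (Nat.prime_dvd_prime_iff_eq hr hpr).mp hrdvd
            omega
        refine ⟨ihlen, fun i hiN => ?_⟩
        rw [ihget i hiN]
        unfold pvMarked
        constructor
        · rintro (h | h | ⟨q, hq, hqle, hqd, hqs⟩)
          · exact Or.inl h
          · exact Or.inr (Or.inl h)
          · exact Or.inr (Or.inr ⟨q, hq, by omega, hqd, hqs⟩)
        · rintro (h | h | ⟨q, hq, hqle, hqd, hqs⟩)
          · exact Or.inl h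
          · exact Or.inr (Or.inl h)
          · rcases Nat.lt_or_ge q (k + 2) with hql | hqe
            · exact Or.inr (Or.inr ⟨q, hq, by omega, hqd, hqs⟩)
            · have hq' : q = k + 2 := by omega
              subst hq'
              exact absurd hq hnprime

lemma pvSieve_getD {N i : Nat} (h2 : 2 ≤ i) (hiN : i ≤ N) :
    (pvSieve N).getD i false = decide (Nat.Prime i) := by
  obtain ⟨-, hget⟩ := pvSieve_inv N (Nat.sqrt N + 1 - 2) (le_refl _)
  have hs1 : 1 ≤ Nat.sqrt N := Nat.le_sqrt.mpr (by omega)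
  have hget' := hget i hiN
  rw [show Nat.sqrt N + 1 - 2 + 1 = Nat.sqrt N from by omega] at hget'
  by_cases hpr : Nat.Prime i
  · simp only [hpr, decide_true]
    cases hb : (pvSieve N).getD i false
    · exfalso
      rcases hget'.mp hb with h | h | ⟨q, hq, hqle, hqd, hqs⟩
      · omega
      · omega
      · have hqi : q = i := (Nat.prime_dvd_prime_iff_eq hq hpr).mp hqd
        subst hqi
        nlinarith
    · rfl
  · simp only [hpr, decide_false]
    have h1 : i.minFac ∣ i := Nat.minFac_dvd _
    have hq : Nat.Prime i.minFac := Nat.minFac_prime (by omega)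
    have h3 : i.minFac ^ 2 ≤ i := Nat.minFac_sq_le_self (by omega) hpr
    rw [pow_two] at h3
    have hle : i.minFac ≤ Nat.sqrt N := Nat.le_sqrt.mpr (by omega)
    exact hget'.mpr (Or.inr (Or.inr ⟨i.minFac, hq, hle, h1, h3⟩))

lemma is_prime_nat (m : Nat) : is_prime (m : Int) = decide (Nat.Prime m) := by
  unfold is_prime
  by_cases hm : (m : Int) ≤ 1
  · rw [if_pos hm]
    have hm1 : m ≤ 1 := by exact_mod_cast hm
    interval_cases m <;> decide
  · rw [if_neg hm]
    have hm2 : 2 ≤ m := by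
      by_contra h
      exact hm (by push_cast; omega)
    rw [Bool.eq_iff_iff]
    simp only [List.all_eq_true, PySem.List.mem_pyRange_one, Int.toNat_natCast,
      Bool.not_eq_eq_eq_not, Bool.not_true, beq_eq_false_iff_ne, ne_eq,
      PySem.Int.mod_eq_zero_iff_dvd, decide_eq_true_eq]
    constructor
    · intro h
      rw [Nat.prime_def_le_sqrt]
      refine ⟨hm2, fun d hd2 hdle => fun hdvd => ?_⟩
      exact h (d : Int) ⟨by exact_mod_cast hd2, by push_cast; omega⟩ (Int.ofNat_dvd.mpr hdvd)
    · intro hpr i hi hdvd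
      obtain ⟨hi2, hilt⟩ := hi
      obtain ⟨d, rfl⟩ : ∃ d : Nat, i = (d : Int) := ⟨i.toNat, (Int.toNat_of_nonneg (by omega)).symm⟩
      have hd2 : 2 ≤ d := by exact_mod_cast hi2
      have hdle : d ≤ Nat.sqrt m := by exact_mod_cast (by omega : (d : Int) ≤ (Nat.sqrt m : Int))
      exact (Nat.prime_def_le_sqrt.mp hpr).2 d hd2 hdle (Int.ofNat_dvd.mp hdvd)

-- ===== VERDICT (by name: the statement is the Claim_ definition above) =====
theorem count_palindromic_primes_spec : Claim_equal_count_palindromic_primes := by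
  intro n _
  unfold Spec_count_palindromic_primes
  by_cases hn : n < 2
  · have hb : count_palindromic_primes_alt n = 0 := by
      unfold count_palindromic_primes_alt; rw [if_pos hn]
    rw [hb]
    have h3 : n + 1 ≤ 0 ∨ n = 0 ∨ n = 1 := by omega
    rcases h3 with h | rfl | rfl
    · unfold count_palindromic_primes
      rw [PySem.List.pyRange_one_eq_nil (by omega)]
      rfl
    · decide
    · decide
  · have hn2 : 2 ≤ n := by omega
    clear hn
    obtain ⟨N, rfl⟩ : ∃ N : Nat, n = (N : Int) := ⟨n.toNat, (Int.toNat_of_nonneg (by omega)).symm⟩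
    have hN2 : 2 ≤ N := by exact_mod_cast hn2
    unfold count_palindromic_primes count_palindromic_primes_alt
    rw [if_neg (by omega : ¬ ((N : Int) < 2))]
    simp only [Int.toNat_natCast]
    rw [PySem.List.pyRange_one, show ((N : Int) + 1 - 0).toNat = N + 1 from by omega,
      List.foldl_map, List.range_eq_range']
    simp only [zero_add]
    rw [show N + 1 = 2 + (N + 1 - 2) from by omega,
      ← List.range'_append (s := 0) (m := 2) (n := N + 1 - 2) (step := 1),
      List.foldl_append]
    norm_num
    have h0 : List.foldl
        (fun (x : Int) (y : Nat) =>
          if PySem.Int.toChars ↑y = (PySem.Int.toChars ↑y).reverse then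
            if is_prime ↑y = true then x + 1 else x else x)
        0 (List.range' 0 2) = 0 := by decide
    rw [h0]
    apply PySem.List.foldl_congr_mem
    intro acc i hi
    obtain ⟨j, hj, hij⟩ := List.mem_range'.mp hi
    have h2i : 2 ≤ i := by omega
    have hiN : i ≤ N := by omega
    rw [← List.getD_eq_getElem?_getD, pvSieve_getD h2i hiN, is_prime_nat]
    split_ifs <;> first | rfl | tauto
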